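-- pv_equiv track=rewrite | github.com/Polymathera/colony | src/polymathera/colony/agents/patterns/actions/minimal.py | _resolve_action_key
-- ===== SOURCE A (Python) =====
-- def _resolve_action_key(raw_key: str, valid_keys: list[str]) -> str | None:
--     """Resolve an LLM-produced action key against valid keys.
--
--     Tries: exact match, suffix match, case-insensitive match.
--     """
--     # Exact match
--     if raw_key in valid_keys:
--         return raw_key
--
--     # Suffix match (LLM emitted just the method name)
--     for key in valid_keys:
--         if key.endswith(f".{raw_key}"):
--             return key
--
--     # Case-insensitive
--     raw_lower = raw_key.lower()
--     for key in valid_keys: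
--         if key.lower() == raw_lower:
--             return key
--
--     # Method name extraction
--     for key in valid_keys:
--         method_name = key.split(".")[-1] if "." in key else key
--         if method_name == raw_key or method_name.lower() == raw_lower:
--             return key
--
--     return None
-- ===== SOURCE B (Python) =====
-- def _resolve_action_key(raw_key: str, valid_keys: list[str]) -> str | None:
--     """Single pass: rank each key (0 exact, 1 suffix, 2 case-insensitive,
--     3 method-name) and keep the best (lowest rank, earliest) key."""
--     raw_lower = raw_key.lower()
--     suffix = "." + raw_key
--     best_rank = 4
--     best_key = None
--     for key in valid_keys:
--         if key == raw_key:  # rank 0: cannot be beaten, earliest wins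
--             return key
--         if key.endswith(suffix):
--             rank = 1
--         elif key.lower() == raw_lower:
--             rank = 2
--         else:
--             method_name = key.split(".")[-1] if "." in key else key
--             rank = 3 if (method_name == raw_key or method_name.lower() == raw_lower) else 4
--         if rank < best_rank:
--             best_rank, best_key = rank, key
--     return best_key
-- ===== Notes on version B (the rewrite author's own statement) =====
-- stated objective: faster
-- what changed: Replaces A's four sequential scans over valid_keys (exact, suffix, case-insensitive, method-name) by a single pass that assigns each key a match rank and keeps the lowest-ranked, earliest key, returning immediately on an exact match; the '.'+raw_key suffix and raw_key.lower() are computed once instead of per scan.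
import Mathlib
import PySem

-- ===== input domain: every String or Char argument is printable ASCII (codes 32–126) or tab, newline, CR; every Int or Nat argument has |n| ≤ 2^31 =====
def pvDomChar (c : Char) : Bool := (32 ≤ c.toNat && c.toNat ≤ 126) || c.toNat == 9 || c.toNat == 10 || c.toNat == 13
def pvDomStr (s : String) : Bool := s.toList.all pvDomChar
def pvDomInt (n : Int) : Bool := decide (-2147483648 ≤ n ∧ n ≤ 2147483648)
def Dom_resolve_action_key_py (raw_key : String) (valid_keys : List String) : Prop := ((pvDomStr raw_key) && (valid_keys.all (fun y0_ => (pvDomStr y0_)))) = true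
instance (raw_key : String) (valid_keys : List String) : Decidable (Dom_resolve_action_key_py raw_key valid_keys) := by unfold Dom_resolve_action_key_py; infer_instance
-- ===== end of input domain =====

-- B replaces A's four sequential scans by one pass tracking the best-ranked key; same return value, no side effects.

-- ===== PORT A =====
-- literal port of A's four passes: exact, suffix, case-insensitive, method-name
def resolve_action_key_py (raw_key : String) (valid_keys : List String) : Option String :=
  if valid_keys.contains raw_key then some raw_key
  else
    match valid_keys.find? (fun key => PySem.Str.endswith key ("." ++ raw_key)) with
    | some key => some key
    | none =>
      let raw_lower := PySem.Str.lower raw_key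
      match valid_keys.find? (fun key => PySem.Str.lower key == raw_lower) with
      | some key => some key
      | none =>
        match valid_keys.find? (fun key =>
            -- key.split(".")[-1]: split? is some (sep "." ≠ ""), and the split list is nonempty, so [-1] is total
            let method_name := if PySem.Str.isIn "." key
              then PySem.List.pyGetD ((PySem.Str.split? key ".").getD []) (-1) ""
              else key
            method_name == raw_key || PySem.Str.lower method_name == raw_lower) with
        | some key => some key
        | none => none

-- ===== PORT B =====
-- Source B's single loop: best_rank/best_key accumulator, early return on an exact (rank-0) match
def altLoop (raw_key raw_lower suffix : String) : List String → Nat → Option String → Option String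
  | [], _, best_key => best_key
  | key :: rest, best_rank, best_key =>
    if key == raw_key then some key
    else
      let rank : Nat :=
        if PySem.Str.endswith key suffix then 1
        else if PySem.Str.lower key == raw_lower then 2
        else
          let method_name := if PySem.Str.isIn "." key
            then PySem.List.pyGetD ((PySem.Str.split? key ".").getD []) (-1) ""
            else key
          if method_name == raw_key || PySem.Str.lower method_name == raw_lower then 3 else 4
      if rank < best_rank then altLoop raw_key raw_lower suffix rest rank (some key)
      else altLoop raw_key raw_lower suffix rest best_rank best_key

def resolve_action_key_py_alt (raw_key : String) (valid_keys : List String) : Option String :=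
  let raw_lower := PySem.Str.lower raw_key
  let suffix := "." ++ raw_key
  altLoop raw_key raw_lower suffix valid_keys 4 none

-- ===== PRECONDITION & SPEC =====
def Spec_resolve_action_key_py (raw_key : String) (valid_keys : List String) (out : Option String) : Prop := out = resolve_action_key_py_alt raw_key valid_keys
instance (raw_key : String) (valid_keys : List String) (out : Option String) : Decidable (Spec_resolve_action_key_py raw_key valid_keys out) := by unfold Spec_resolve_action_key_py; infer_instance

-- ===== CLAIM (what is proved, stated in full; the proofs are below) =====
def Claim_equal_resolve_action_key_py : Prop := ∀ (raw_key : String) (valid_keys : List String), Dom_resolve_action_key_py raw_key valid_keys → Spec_resolve_action_key_py raw_key valid_keys (resolve_action_key_py raw_key valid_keys)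

-- ===== LEMMAS AND PROOFS =====

-- the four match conditions, and the rank of a key (first condition that holds)
def cSuf (raw k : String) : Bool := PySem.Str.endswith k ("." ++ raw)
def cLow (raw k : String) : Bool := PySem.Str.lower k == PySem.Str.lower raw
def cMeth (raw k : String) : Bool :=
  let method_name := if PySem.Str.isIn "." k
    then PySem.List.pyGetD ((PySem.Str.split? k ".").getD []) (-1) ""
    else k
  method_name == raw || PySem.Str.lower method_name == PySem.Str.lower raw
def rk (raw k : String) : Nat :=
  if k == raw then 0
  else if cSuf raw k then 1
  else if cLow raw k then 2
  else if cMeth raw k then 3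
  else 4

-- A's definition re-expressed with the named conditions (definitional)
theorem A_eq (raw : String) (keys : List String) : resolve_action_key_py raw keys =
    (if keys.contains raw = true then some raw
     else match keys.find? (cSuf raw) with
     | some k => some k
     | none => match keys.find? (cLow raw) with
       | some k => some k
       | none => match keys.find? (cMeth raw) with
         | some k => some k
         | none => none) := rfl

theorem altLoop_step (raw key : String) (rest : List String) (br : Nat) (bk : Option String) :
    altLoop raw (PySem.Str.lower raw) ("." ++ raw) (key :: rest) br bk =
      if (key == raw) = true then some key
      else if rk raw key < br then altLoop raw (PySem.Str.lower raw) ("." ++ raw) rest (rk raw key) (some key)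
      else altLoop raw (PySem.Str.lower raw) ("." ++ raw) rest br bk := by
  by_cases h0 : (key == raw) = true
  all_goals simp only [altLoop, rk, cSuf, cLow, cMeth, h0, if_true, Bool.not_eq_true] at *
  all_goals (split_ifs <;> simp_all)

theorem rk_zero (raw k : String) (h : (k == raw) = true) : rk raw k = 0 := by
  simp [rk, h]

theorem one_le_rk (raw k : String) (h : (k == raw) = false) : 1 ≤ rk raw k := by
  simp only [rk, h, Bool.false_eq_true, if_false]
  split_ifs <;> omega

theorem two_le_rk (raw k : String) (h : (k == raw) = false) (h1 : cSuf raw k = false) :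
    2 ≤ rk raw k := by
  simp only [rk, h, h1, Bool.false_eq_true, if_false]
  split_ifs <;> omega

theorem three_le_rk (raw k : String) (h : (k == raw) = false) (h1 : cSuf raw k = false)
    (h2 : cLow raw k = false) : 3 ≤ rk raw k := by
  simp only [rk, h, h1, h2, Bool.false_eq_true, if_false]
  split_ifs <;> omega

theorem rk_four (raw k : String) (h : (k == raw) = false) (h1 : cSuf raw k = false)
    (h2 : cLow raw k = false) (h3 : cMeth raw k = false) : rk raw k = 4 := by
  simp [rk, h, h1, h2, h3]

theorem rk_beq_one (raw k : String) (h : (k == raw) = false) :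
    (rk raw k == 1) = cSuf raw k := by
  simp only [rk, h, Bool.false_eq_true, if_false]
  split_ifs with h1 h2 h3 <;> simp [h1]

theorem rk_beq_two (raw k : String) (h : (k == raw) = false) (h1 : cSuf raw k = false) :
    (rk raw k == 2) = cLow raw k := by
  simp only [rk, h, h1, Bool.false_eq_true, if_false]
  split_ifs with h2 h3 <;> simp [h2]

theorem rk_beq_three (raw k : String) (h : (k == raw) = false) (h1 : cSuf raw k = false)
    (h2 : cLow raw k = false) : (rk raw k == 3) = cMeth raw k := by
  simp only [rk, h, h1, h2, Bool.false_eq_true, if_false]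
  split_ifs with h3 <;> simp [h3]

theorem loop_exit0 (raw : String) : ∀ (rest : List String) (br : Nat) (bk : Option String),
    (∃ k ∈ rest, (k == raw) = true) →
    altLoop raw (PySem.Str.lower raw) ("." ++ raw) rest br bk = some raw := by
  intro rest
  induction rest with
  | nil => intro br bk h; obtain ⟨k, hk, _⟩ := h; simp at hk
  | cons key rest ih =>
    intro br bk h
    rw [altLoop_step]
    by_cases h0 : (key == raw) = true
    · rw [if_pos h0, eq_of_beq h0]
    · rw [if_neg h0]
      have h' : ∃ k ∈ rest, (k == raw) = true := by
        obtain ⟨k, hk, hb⟩ := h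
        rcases List.mem_cons.mp hk with rfl | hk
        · exact absurd hb h0
        · exact ⟨k, hk, hb⟩
      split_ifs <;> exact ih _ _ h'

theorem loop_low (raw : String) : ∀ (rest : List String) (b : Nat) (k : String),
    1 ≤ b → (∀ x ∈ rest, b ≤ rk raw x) →
    altLoop raw (PySem.Str.lower raw) ("." ++ raw) rest b (some k) = some k := by
  intro rest
  induction rest with
  | nil => intro b k _ _; rfl
  | cons x rest ih =>
    intro b k hb hge
    have hx : b ≤ rk raw x := hge x (List.mem_cons_self ..)
    have h0 : ¬ (x == raw) = true := by
      intro h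
      have := rk_zero raw x h
      omega
    rw [altLoop_step, if_neg h0, if_neg (by omega : ¬ rk raw x < b)]
    exact ih b k hb (fun y hy => hge y (List.mem_cons_of_mem _ hy))

theorem loop_find (raw : String) : ∀ (rest : List String) (b : Nat),
    1 ≤ b → (∀ x ∈ rest, b ≤ rk raw x) →
    ∀ (k0 : String), rest.find? (fun x => rk raw x == b) = some k0 →
    ∀ (br : Nat) (bk : Option String), b < br →
    altLoop raw (PySem.Str.lower raw) ("." ++ raw) rest br bk = some k0 := by
  intro rest
  induction rest with
  | nil => intro b _ _ k0 hf; simp at hf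
  | cons x rest ih =>
    intro b hb hge k0 hf br bk hbr
    have hx : b ≤ rk raw x := hge x (List.mem_cons_self ..)
    have h0 : ¬ (x == raw) = true := by
      intro h
      have := rk_zero raw x h
      omega
    have hge' : ∀ y ∈ rest, b ≤ rk raw y := fun y hy => hge y (List.mem_cons_of_mem _ hy)
    rw [altLoop_step, if_neg h0]
    by_cases hxb : rk raw x = b
    · have hpx : (rk raw x == b) = true := by simp [hxb]
      simp only [List.find?_cons, hpx] at hf
      injection hf with hf
      subst hf
      rw [if_pos (by omega : rk raw x < br), hxb]
      exact loop_low raw rest b x hb hge'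
    · have hpx : (rk raw x == b) = false := by simp [hxb]
      simp only [List.find?_cons, hpx] at hf
      have hblt : b < rk raw x := by omega
      split_ifs with hlt
      · exact ih b hb hge' k0 hf (rk raw x) (some x) hblt
      · exact ih b hb hge' k0 hf br bk hbr

theorem loop_none (raw : String) : ∀ (rest : List String),
    (∀ x ∈ rest, rk raw x = 4) →
    altLoop raw (PySem.Str.lower raw) ("." ++ raw) rest 4 none = none := by
  intro rest
  induction rest with
  | nil => intro _; rfl
  | cons x rest ih =>
    intro h4
    have hx := h4 x (List.mem_cons_self ..)
    have h0 : ¬ (x == raw) = true := by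
      intro h
      have := rk_zero raw x h
      omega
    rw [altLoop_step, if_neg h0, if_neg (by omega : ¬ rk raw x < 4)]
    exact ih (fun y hy => h4 y (List.mem_cons_of_mem _ hy))

theorem find?_congr' {p q : String → Bool} : ∀ (l : List String),
    (∀ x ∈ l, p x = q x) → l.find? p = l.find? q := by
  intro l
  induction l with
  | nil => intro _; rfl
  | cons x l ih =>
    intro h
    have hx := h x (List.mem_cons_self ..)
    simp only [List.find?_cons, hx]
    cases q x
    · exact ih (fun y hy => h y (List.mem_cons_of_mem _ hy))
    · rfl

-- ===== VERDICT (by name: the statement is the Claim_ definition above) =====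
theorem resolve_action_key_py_spec : Claim_equal_resolve_action_key_py := by
  intro raw keys _
  show resolve_action_key_py raw keys = resolve_action_key_py_alt raw keys
  rw [A_eq]
  show _ = altLoop raw (PySem.Str.lower raw) ("." ++ raw) keys 4 none
  by_cases hc : keys.contains raw = true
  · rw [if_pos hc]
    exact (loop_exit0 raw keys 4 none ⟨raw, List.contains_iff_mem.mp hc, by simp⟩).symm
  · rw [if_neg hc]
    have h0 : ∀ x ∈ keys, (x == raw) = false := by
      intro x hx
      cases hb : x == raw with
      | false => rfl
      | true => exact absurd (List.contains_iff_mem.mpr (eq_of_beq hb ▸ hx)) hc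
    have hge1 : ∀ x ∈ keys, 1 ≤ rk raw x := fun x hx => one_le_rk raw x (h0 x hx)
    cases hf1 : keys.find? (cSuf raw) with
    | some k =>
      have hfind : keys.find? (fun x => rk raw x == 1) = some k :=
        (find?_congr' keys (fun x hx => rk_beq_one raw x (h0 x hx))).trans hf1
      exact (loop_find raw keys 1 le_rfl hge1 k hfind 4 none (by omega)).symm
    | none =>
      have hn1 : ∀ x ∈ keys, cSuf raw x = false := by
        intro x hx; simpa using List.find?_eq_none.mp hf1 x hx
      have hge2 : ∀ x ∈ keys, 2 ≤ rk raw x := fun x hx => two_le_rk raw x (h0 x hx) (hn1 x hx)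
      cases hf2 : keys.find? (cLow raw) with
      | some k =>
        have hfind : keys.find? (fun x => rk raw x == 2) = some k :=
          (find?_congr' keys (fun x hx => rk_beq_two raw x (h0 x hx) (hn1 x hx))).trans hf2
        exact (loop_find raw keys 2 (by omega) hge2 k hfind 4 none (by omega)).symm
      | none =>
        have hn2 : ∀ x ∈ keys, cLow raw x = false := by
          intro x hx; simpa using List.find?_eq_none.mp hf2 x hx
        have hge3 : ∀ x ∈ keys, 3 ≤ rk raw x :=
          fun x hx => three_le_rk raw x (h0 x hx) (hn1 x hx) (hn2 x hx)
        cases hf3 : keys.find? (cMeth raw) with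
        | some k =>
          have hfind : keys.find? (fun x => rk raw x == 3) = some k :=
            (find?_congr' keys (fun x hx => rk_beq_three raw x (h0 x hx) (hn1 x hx) (hn2 x hx))).trans hf3
          exact (loop_find raw keys 3 (by omega) hge3 k hfind 4 none (by omega)).symm
        | none =>
          have hn3 : ∀ x ∈ keys, cMeth raw x = false := by
            intro x hx; simpa using List.find?_eq_none.mp hf3 x hx
          have h4 : ∀ x ∈ keys, rk raw x = 4 :=
            fun x hx => rk_four raw x (h0 x hx) (hn1 x hx) (hn2 x hx) (hn3 x hx)
          exact (loop_none raw keys h4).symm
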